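-- pv_equiv track=rewrite | github.com/lee2sh/advent | day3/day3.py | getGamma
-- ===== SOURCE A (Python) =====
-- def getGamma(bn):
--     gamma = ""
--     for i in range(len(bn[0].strip("\n"))):
--         count1 = 0
--         count0 = 0
--         for j in range(len(bn)):
--             if bn[j][i] == "1":
--                 count1 += 1
--             else:
--                 count0 += 1
--         if count1 > count0:
--             gamma += "1"
--         else:
--             gamma += "0"
--     res = int(gamma, 2)
--     return (res, gamma)
-- ===== SOURCE B (Python) =====
-- def getGamma(bn):
--     width = len(bn[0].strip("\n"))
--     n = len(bn)
--     counts = [0] * width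
--     for row in bn:
--         counts = [c + (ch == "1") for c, ch in zip(counts, row)]
--     gamma = "".join("1" if 2 * c > n else "0" for c in counts)
--     return (int(gamma, 2), gamma)
-- ===== Notes on version B (the rewrite author's own statement) =====
-- stated objective: alternative
-- what changed: A recounts each column with a nested loop over all rows (column-major); B makes a single row-major pass maintaining a per-column counts list via zip, then derives each gamma bit from counts with the strict 2*c > len(bn) test.
import Mathlib
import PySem

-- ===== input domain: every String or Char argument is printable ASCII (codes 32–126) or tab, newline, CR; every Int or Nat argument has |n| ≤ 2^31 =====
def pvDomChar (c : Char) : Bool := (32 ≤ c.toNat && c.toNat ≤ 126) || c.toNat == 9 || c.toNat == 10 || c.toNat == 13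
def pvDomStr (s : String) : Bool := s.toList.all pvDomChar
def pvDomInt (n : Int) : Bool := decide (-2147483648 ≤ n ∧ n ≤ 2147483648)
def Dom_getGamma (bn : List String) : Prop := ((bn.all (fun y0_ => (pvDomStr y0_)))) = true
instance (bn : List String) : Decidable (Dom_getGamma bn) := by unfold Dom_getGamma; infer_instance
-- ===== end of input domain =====

-- B replaces A's column-major double loop (recount per column) with one row-major pass maintaining a
-- per-column counts list, then builds gamma from the counts; objective: alternative decomposition.


-- ===== PORT A =====
-- gamma is built as a List Char (string facts are proved on the list side; String.ofList at the end).
-- bn[0] and bn[j] are ported with pyGetD: Pre_ excludes the empty bn, and j ∈ range(len(bn)) is in range,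
-- so the defaults are never used inside Pre_; bn[j][i] likewise (Pre_ demands every row have ≥ width chars).
-- int(gamma, 2) is PySem.Int.ofCharsBase?; its none (ValueError on the empty gamma) is excluded by Pre_.
-- the inner j-loop of A: (count1, count0) for column i
def pvInner (bn : List String) (i : Int) : Int × Int :=
  (PySem.List.pyRange 0 (bn.length : Int)).foldl
    (fun (c : Int × Int) j =>
      if (PySem.Str.pyGet? (PySem.List.pyGetD bn j "") i).getD ' ' = '1'
      then (c.1 + 1, c.2) else (c.1, c.2 + 1)) (0, 0)

def getGamma (bn : List String) : Int × String :=
  let gamma : List Char :=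
    (PySem.List.pyRange 0 (PySem.Str.len (PySem.Str.stripChars (PySem.List.pyGetD bn 0 "") "\n"))).foldl
      (fun g i =>
        if (pvInner bn i).1 > (pvInner bn i).2 then g ++ ['1'] else g ++ ['0']) []
  ((PySem.Int.ofCharsBase? gamma 2).getD 0, String.ofList gamma)

-- ===== PORT B =====
-- [0]*width is List.replicate width.toNat 0 (width = len(...) ≥ 0, so toNat is exact);
-- zip(counts, row) is counts.zip row.toList; c + (ch == "1") adds the 0/1 value of the bool.
def getGamma_alt (bn : List String) : Int × String :=
  let width : Int := PySem.Str.len (PySem.Str.stripChars (PySem.List.pyGetD bn 0 "") "\n")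
  let n : Int := (bn.length : Int)
  let counts : List Int :=
    bn.foldl
      (fun counts row =>
        (counts.zip row.toList).map (fun p => p.1 + (if p.2 = '1' then 1 else 0)))
      (List.replicate width.toNat 0)
  let gamma : List Char := counts.map (fun c => if 2 * c > n then '1' else '0')
  ((PySem.Int.ofCharsBase? gamma 2).getD 0, String.ofList gamma)

-- ===== PRECONDITION & SPEC =====
-- Pre_ excludes exactly the inputs where A raises: empty bn (IndexError on bn[0]), zero width
-- (int("", 2) is a ValueError), and any row shorter than the width (IndexError on bn[j][i]).
def Pre_getGamma (bn : List String) : Prop :=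
  bn ≠ [] ∧
  0 < (PySem.Chars.stripChars (bn.headD "").toList ['\n']).length ∧
  ∀ s ∈ bn, (PySem.Chars.stripChars (bn.headD "").toList ['\n']).length ≤ s.toList.length
instance (bn : List String) : Decidable (Pre_getGamma bn) := by unfold Pre_getGamma; infer_instance
def pvWitness_getGamma : List String := ["10", "11", "01"]

def Spec_getGamma (bn : List String) (out : Int × String) : Prop := out = getGamma_alt bn
instance (bn : List String) (out : Int × String) : Decidable (Spec_getGamma bn out) := by unfold Spec_getGamma; infer_instance

-- ===== CLAIM (what is proved, stated in full; the proofs are below) =====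
def Claim_equal_getGamma : Prop := ∀ (bn : List String), Dom_getGamma bn → Pre_getGamma bn → Spec_getGamma bn (getGamma bn)

-- ===== LEMMAS AND PROOFS =====

-- number of rows of l whose i-th char is '1' (the quantity both programs tally)
def pvCnt (l : List String) (i : Int) : Int :=
  (l.countP (fun row => ((PySem.Str.pyGet? row i).getD ' ') == '1') : Int)

theorem pvCnt_nil (i : Int) : pvCnt [] i = 0 := rfl

theorem pvCnt_cons (r : String) (l : List String) (i : Int) :
    pvCnt (r :: l) i
      = (if (PySem.Str.pyGet? r i).getD ' ' = '1' then 1 else 0) + pvCnt l i := by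
  simp only [pvCnt, List.countP_cons, beq_iff_eq]
  split_ifs with h <;> push_cast <;> ring

-- A's inner loop: fold over the rows accumulating (count1, count0)
theorem pvPairFold (l : List String) (i : Int) (a b : Int) :
    l.foldl
      (fun (c : Int × Int) row =>
        if (PySem.Str.pyGet? row i).getD ' ' = '1'
        then (c.1 + 1, c.2) else (c.1, c.2 + 1)) (a, b)
      = (a + pvCnt l i, b + ((l.length : Int) - pvCnt l i)) := by
  induction l generalizing a b with
  | nil => simp [pvCnt_nil]
  | cons r t ih =>
    simp only [List.foldl_cons]
    rw [pvCnt_cons]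
    split_ifs with h
    all_goals rw [ih]; simp only [Prod.mk.injEq, List.length_cons]; push_cast; constructor <;> omega

-- B's outer loop: the counts list after folding rows l from cs
theorem pvCountsFold (l : List String) (cs : List Int)
    (h : ∀ r ∈ l, cs.length ≤ r.toList.length) :
    l.foldl
      (fun counts row =>
        (counts.zip row.toList).map (fun p => p.1 + (if p.2 = '1' then 1 else 0))) cs
      = (List.range cs.length).map (fun k => cs.getD k 0 + pvCnt l (k : Int)) := by
  induction l generalizing cs with
  | nil =>
    simp only [List.foldl_nil, pvCnt_nil, add_zero]
    apply List.ext_getElem (by simp)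
    intro i h1 h2
    simp [List.getD_eq_getElem?_getD, List.getElem?_eq_getElem h1]
  | cons r t ih =>
    simp only [List.foldl_cons]
    have hlen : ((cs.zip r.toList).map (fun p : Int × Char => p.1 + (if p.2 = '1' then 1 else 0))).length = cs.length := by
      rw [List.length_map, List.length_zip]
      exact Nat.min_eq_left (h r (by simp))
    rw [ih _ (by intro r' hr'; rw [hlen]; exact h r' (by simp [hr']))]
    rw [hlen]
    apply List.map_congr_left
    intro k hk
    simp only [List.mem_range] at hk
    have hkr : k < r.toList.length := lt_of_lt_of_le hk (h r (by simp))
    rw [pvCnt_cons]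
    have hk2 : k < (cs.zip r.toList).length := by
      rw [List.length_zip]; exact lt_min hk hkr
    have hget : ((cs.zip r.toList).map (fun p : Int × Char => p.1 + (if p.2 = '1' then 1 else 0))).getD k 0
        = cs.getD k 0 + (if r.toList[k] = '1' then 1 else 0) := by
      rw [List.getD_eq_getElem?_getD, List.getElem?_map, List.getElem?_eq_getElem hk2]
      simp [List.getElem_zip, List.getD_eq_getElem?_getD, List.getElem?_eq_getElem hk]
    rw [hget]
    have : (PySem.Str.pyGet? r (k : Int)).getD ' ' = r.toList[k] := by
      simp [List.getElem?_eq_getElem hkr]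
    rw [this]
    ring

theorem pvInner_eq (bn : List String) (i : Int) :
    pvInner bn i = (pvCnt bn i, (bn.length : Int) - pvCnt bn i) := by
  unfold pvInner
  rw [PySem.List.foldl_pyRange_zero_pyGetD' bn ""
    (fun (c : Int × Int) row =>
      if (PySem.Str.pyGet? row i).getD ' ' = '1'
      then (c.1 + 1, c.2) else (c.1, c.2 + 1)) (0, 0)]
  rw [pvPairFold]
  simp

theorem pvBit (bn : List String) (g : List Char) (i : Int) :
    (if (pvInner bn i).1 > (pvInner bn i).2 then g ++ ['1'] else g ++ ['0'])
      = g ++ [if 2 * pvCnt bn i > (bn.length : Int) then '1' else '0'] := by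
  simp only [pvInner_eq]
  split_ifs with h1 h2 h3 <;> first | rfl | (exfalso; omega)

theorem getGamma_spec : Claim_equal_getGamma := by
  intro bn _ hpre
  obtain ⟨hne, hwpos, hrows⟩ := hpre
  cases bn with
  | nil => exact absurd rfl hne
  | cons r t =>
    have h0 : PySem.List.pyGetD (r :: t) (0 : Int) "" = r := by
      simp [PySem.List.pyGetD_ofNat']
    have hhead : (r :: t).headD "" = r := rfl
    rw [hhead] at hwpos hrows
    have hlen : PySem.Str.len (PySem.Str.stripChars r "\n")
        = ((PySem.Chars.stripChars r.toList ['\n']).length : Int) := by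
      rw [PySem.Str.len_eq, PySem.Str.toList_stripChars]
      rfl
    unfold Spec_getGamma
    simp only [getGamma, getGamma_alt, h0, hlen, Int.toNat_natCast]
    -- rewrite A's gamma into map form
    rw [List.foldl_ext _
      (fun (g : List Char) (i : Int) =>
        g ++ [if 2 * pvCnt (r :: t) i > ((r :: t).length : Int) then '1' else '0'])
      _ (fun g i _ => pvBit (r :: t) g i)]
    rw [PySem.List.foldl_append_singleton_eq_map, List.nil_append]
    rw [PySem.List.pyRange_zero_nat, List.map_map]
    -- rewrite B's counts into map form
    rw [pvCountsFold (r :: t) _ (by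
      intro r' hr'
      rw [List.length_replicate]
      exact hrows r' hr')]
    rw [List.length_replicate, List.map_map]
    have hmap : ∀ k ∈ List.range (PySem.Chars.stripChars r.toList ['\n']).length,
        ((fun c => if 2 * c > ((r :: t).length : Int) then '1' else '0') ∘
          fun k => (List.replicate (PySem.Chars.stripChars r.toList ['\n']).length (0 : Int)).getD k 0 + pvCnt (r :: t) (k : Int)) k
          = ((fun i => if 2 * pvCnt (r :: t) i > ((r :: t).length : Int) then '1' else '0') ∘
              fun k : Nat => (k : Int)) k := by
      intro k _
      simp
    rw [List.map_congr_left hmap]
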